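-- pv_equiv track=rewrite | github.com/ericc59/aria | aria/core/trace_viewer.py | _diff_grid_html
-- ===== SOURCE A (Python) =====
-- def _diff_grid_html(input_grid: list[list[int]], output_grid: list[list[int]],
--                     cell_size: int = 22) -> str:
--     """Render a diff overlay: green=same, red=different."""
--     rows = max(len(input_grid), len(output_grid))
--     cols = max(
--         (len(input_grid[0]) if input_grid else 0),
--         (len(output_grid[0]) if output_grid else 0),
--     )
--     parts = [f'<table style="border-collapse:collapse;margin:4px 0;">']
--     for r in range(rows):
--         parts.append("<tr>")
--         for c in range(cols):
--             iv = input_grid[r][c] if r < len(input_grid) and c < len(input_grid[r]) else -1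
--             ov = output_grid[r][c] if r < len(output_grid) and c < len(output_grid[r]) else -1
--             same = iv == ov
--             bg = "#2a2" if same else "#c33"
--             parts.append(
--                 f'<td style="width:{cell_size}px;height:{cell_size}px;'
--                 f'background:{bg};color:#fff;text-align:center;'
--                 f'font-size:10px;border:1px solid #333;">'
--                 f'{ov if ov >= 0 else "?"}</td>'
--             )
--         parts.append("</tr>")
--     parts.append("</table>")
--     return "".join(parts)
-- ===== SOURCE B (Python) =====
-- def _diff_grid_html(input_grid: list[list[int]], output_grid: list[list[int]],
--                     cell_size: int = 22) -> str:
--     """Render a diff overlay: normalize both grids to padded rows x cols rectangles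
--     (missing cells = -1), then emit one row string per padded row pair."""
--     rows = max(len(input_grid), len(output_grid))
--     cols = max(len(input_grid[0]) if input_grid else 0,
--                len(output_grid[0]) if output_grid else 0)
--
--     def pad(g):
--         full = [[row[c] if c < len(row) else -1 for c in range(cols)] for row in g]
--         full += [[-1] * cols] * (rows - len(g))
--         return full
--
--     def cell(iv, ov):
--         bg = "#2a2" if iv == ov else "#c33"
--         val = ov if ov >= 0 else "?"
--         return (f'<td style="width:{cell_size}px;height:{cell_size}px;'
--                 f'background:{bg};color:#fff;text-align:center;'
--                 f'font-size:10px;border:1px solid #333;">{val}</td>')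
--
--     body = "".join(
--         "<tr>" + "".join(cell(iv, ov) for iv, ov in zip(ri, ro)) + "</tr>"
--         for ri, ro in zip(pad(input_grid), pad(output_grid))
--     )
--     return '<table style="border-collapse:collapse;margin:4px 0;">' + body + "</table>"
-- ===== Notes on version B (the rewrite author's own statement) =====
-- stated objective: alternative
-- what changed: Replaces A's nested index loop with inline bounds-checked lookups by a two-phase normalize-then-emit: both grids are first padded to rows x cols rectangles with -1 sentinels, then the HTML is emitted by zipping padded row pairs and joining per-row comprehension strings instead of appending to a flat parts list.
import Mathlib
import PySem

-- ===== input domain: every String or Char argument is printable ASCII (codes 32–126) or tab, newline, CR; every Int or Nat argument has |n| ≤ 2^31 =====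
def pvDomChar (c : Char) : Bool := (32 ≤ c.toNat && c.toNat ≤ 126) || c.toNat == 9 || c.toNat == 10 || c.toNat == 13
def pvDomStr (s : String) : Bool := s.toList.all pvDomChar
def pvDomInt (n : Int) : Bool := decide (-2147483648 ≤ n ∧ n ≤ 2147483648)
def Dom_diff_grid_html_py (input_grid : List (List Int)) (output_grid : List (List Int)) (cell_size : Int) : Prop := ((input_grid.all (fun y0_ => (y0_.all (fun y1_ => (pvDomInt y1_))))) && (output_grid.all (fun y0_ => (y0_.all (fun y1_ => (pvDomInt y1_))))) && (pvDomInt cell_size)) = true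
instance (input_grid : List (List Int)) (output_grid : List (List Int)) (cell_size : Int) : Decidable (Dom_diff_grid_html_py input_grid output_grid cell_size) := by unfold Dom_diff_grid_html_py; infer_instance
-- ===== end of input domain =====

-- B normalizes both grids to padded rows×cols rectangles (missing cells = -1) first, then
-- emits per-row strings over zipped padded rows (objective: alternative decomposition, same cost).

-- ===== PORT A =====
-- literal port of _diff_grid_html: bounds-checked lookup inline in a nested append loop
def diff_grid_html_py (input_grid : List (List Int)) (output_grid : List (List Int)) (cell_size : Int) : String :=
  let rows := max input_grid.length output_grid.length
  let cols := max (match input_grid with | [] => 0 | g :: _ => g.length)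
                  (match output_grid with | [] => 0 | g :: _ => g.length)
  let parts : List String := ["<table style=\"border-collapse:collapse;margin:4px 0;\">"]
  let parts := (List.range rows).foldl (fun parts r =>
    let parts := parts ++ ["<tr>"]
    let parts := (List.range cols).foldl (fun parts c =>
      let iv : Int := if r < input_grid.length ∧ c < (input_grid.getD r []).length
                      then (input_grid.getD r []).getD c 0 else -1
      let ov : Int := if r < output_grid.length ∧ c < (output_grid.getD r []).length
                      then (output_grid.getD r []).getD c 0 else -1
      let same := iv == ov
      let bg := if same then "#2a2" else "#c33"
      parts ++ ["<td style=\"width:" ++ PySem.Int.toStr cell_size ++ "px;height:" ++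
                PySem.Int.toStr cell_size ++ "px;background:" ++ bg ++
                ";color:#fff;text-align:center;font-size:10px;border:1px solid #333;\">" ++
                (if ov ≥ 0 then PySem.Int.toStr ov else "?") ++ "</td>"]) parts
    parts ++ ["</tr>"]) parts
  let parts := parts ++ ["</table>"]
  PySem.Str.join "" parts

-- ===== PORT B =====
-- Source B's pad(g): each row cut/padded to cols with -1, then all-(-1) rows up to rows
def pvPadB (g : List (List Int)) (rows cols : Nat) : List (List Int) :=
  (g.map (fun row => (List.range cols).map (fun c => if c < row.length then row.getD c 0 else -1)))
    ++ List.replicate (rows - g.length) (List.replicate cols (-1))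

-- Source B's cell(iv, ov)
def pvCellB (cell_size iv ov : Int) : String :=
  let bg := if iv == ov then "#2a2" else "#c33"
  let val := if ov ≥ 0 then PySem.Int.toStr ov else "?"
  "<td style=\"width:" ++ PySem.Int.toStr cell_size ++ "px;height:" ++
    PySem.Int.toStr cell_size ++ "px;background:" ++ bg ++
    ";color:#fff;text-align:center;font-size:10px;border:1px solid #333;\">" ++ val ++ "</td>"

def diff_grid_html_py_alt (input_grid : List (List Int)) (output_grid : List (List Int)) (cell_size : Int) : String :=
  let rows := max input_grid.length output_grid.length
  let cols := max (match input_grid with | [] => 0 | g :: _ => g.length)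
                  (match output_grid with | [] => 0 | g :: _ => g.length)
  let body := PySem.Str.join ""
    (((pvPadB input_grid rows cols).zip (pvPadB output_grid rows cols)).map
      (fun p => "<tr>" ++
        PySem.Str.join "" ((p.1.zip p.2).map (fun q => pvCellB cell_size q.1 q.2)) ++ "</tr>"))
  "<table style=\"border-collapse:collapse;margin:4px 0;\">" ++ body ++ "</table>"

-- ===== PRECONDITION & SPEC =====
def Spec_diff_grid_html_py (input_grid : List (List Int)) (output_grid : List (List Int)) (cell_size : Int) (out : String) : Prop := out = diff_grid_html_py_alt input_grid output_grid cell_size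
instance (input_grid : List (List Int)) (output_grid : List (List Int)) (cell_size : Int) (out : String) : Decidable (Spec_diff_grid_html_py input_grid output_grid cell_size out) := by unfold Spec_diff_grid_html_py; infer_instance

-- ===== CLAIM (what is proved, stated in full; the proofs are below) =====
def Claim_equal_diff_grid_html_py : Prop := ∀ (input_grid : List (List Int)) (output_grid : List (List Int)) (cell_size : Int), Dom_diff_grid_html_py input_grid output_grid cell_size → Spec_diff_grid_html_py input_grid output_grid cell_size (diff_grid_html_py input_grid output_grid cell_size)

-- ===== LEMMAS AND PROOFS =====

-- the bounds-checked cell lookup A performs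
def pvLook (g : List (List Int)) (r c : Nat) : Int :=
  if r < g.length ∧ c < (g.getD r []).length then (g.getD r []).getD c 0 else -1

theorem pvJoin_empty_cons (s : String) (l : List String) :
    PySem.Str.join "" (s :: l) = s ++ PySem.Str.join "" l := by
  cases l with
  | nil => simp [PySem.Str.join]
  | cons t l => simp [PySem.Str.join, PySem.Chars.join_cons_cons]

theorem pvJoin_empty_append (a b : List String) :
    PySem.Str.join "" (a ++ b) = PySem.Str.join "" a ++ PySem.Str.join "" b := by
  induction a with
  | nil => simp [PySem.Str.join]
  | cons s a ih => simp [pvJoin_empty_cons, ih, String.append_assoc]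

theorem pvJoin_flatMap {α : Type} (l : List α) (g : α → List String) :
    PySem.Str.join "" (l.flatMap g) = PySem.Str.join "" (l.map (fun x => PySem.Str.join "" (g x))) := by
  induction l with
  | nil => rfl
  | cons x l ih => simp [List.flatMap_cons, pvJoin_empty_append, pvJoin_empty_cons, ih]

-- A's outer loop appends, per r, the block "<tr>" :: cells ++ ["</tr>"]
theorem pvLoopA (cols : Nat) (cell : Nat → Nat → String) (l : List Nat) (init : List String) :
    l.foldl (fun parts r =>
      ((List.range cols).foldl (fun parts c => parts ++ [cell r c]) (parts ++ ["<tr>"])) ++ ["</tr>"]) init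
    = init ++ l.flatMap (fun r => "<tr>" :: ((List.range cols).map (cell r) ++ ["</tr>"])) := by
  induction l generalizing init with
  | nil => simp
  | cons r l ih =>
      rw [List.foldl_cons, PySem.List.foldl_append_singleton_eq_map, ih]
      simp [List.flatMap_cons, List.append_assoc]

-- pad(g) is the range-indexed table of A's lookup
theorem pvPadB_eq (g : List (List Int)) (rows cols : Nat) (h : g.length ≤ rows) :
    pvPadB g rows cols
      = (List.range rows).map (fun r => (List.range cols).map (fun c => pvLook g r c)) := by
  apply List.ext_getElem
  · simp [pvPadB, Nat.add_sub_cancel' h]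
  · intro r h1 h2
    simp only [pvPadB, List.getElem_map, List.getElem_range]
    by_cases hr : r < g.length
    · rw [List.getElem_append_left (by simpa using hr)]
      simp only [List.getElem_map]
      apply List.map_congr_left
      intro c _
      simp [pvLook, hr, List.getD]
    · rw [List.getElem_append_right (by simpa using hr)]
      have hnone : g.getD r [] = [] := by
        unfold List.getD
        rw [List.getElem?_eq_none (by omega), Option.getD_none]
      rw [List.getElem_replicate]
      simp [pvLook, hr]

theorem diff_grid_main (input_grid : List (List Int)) (output_grid : List (List Int)) (cell_size : Int) :
    diff_grid_html_py input_grid output_grid cell_size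
      = diff_grid_html_py_alt input_grid output_grid cell_size := by
  unfold diff_grid_html_py diff_grid_html_py_alt
  simp only []
  rw [pvLoopA]
  rw [pvPadB_eq _ _ _ (le_max_left _ _), pvPadB_eq _ _ _ (le_max_right _ _)]
  rw [List.zip_map']
  simp only [List.map_map, Function.comp_def, List.zip_map']
  rw [List.append_assoc, List.singleton_append, pvJoin_empty_cons, pvJoin_empty_append, pvJoin_flatMap]
  simp only [pvJoin_empty_cons, pvJoin_empty_append]
  have hnil : PySem.Str.join "" ([] : List String) = "" := rfl
  simp [hnil, pvCellB, pvLook, String.append_assoc, String.append_empty]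

-- ===== VERDICT (by name: the statement is the Claim_ definition above) =====
theorem diff_grid_html_py_spec : Claim_equal_diff_grid_html_py := by
  intro input_grid output_grid cell_size _
  unfold Spec_diff_grid_html_py
  exact diff_grid_main input_grid output_grid cell_size
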